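-- pv_equiv track=rewrite | github.com/SXM1352/Crystal_Identification_Algorithm | Ci/SanCheck/SanCheck_Col.py | __left_side
-- ===== SOURCE A (Python) =====
-- def __left_side(median_columns, median_x, columnn):
--     for i in range(3):
--         if columnn == 0:
--             median_columns[columnn] = min(median_x)
--             median_x.remove(min(median_x))
--             columnn = 1
--         else:
--             if columnn < 5:
--                 median_columns[columnn] = min(median_x)
--                 median_x.remove(min(median_x))
--                 columnn += 2
--     return median_columns
-- ===== SOURCE B (Python) =====
-- def __left_side(median_columns, median_x, columnn):
--     # Precompute the target slots by simulating the columnn rule, then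
--     # sort median_x once and assign its k smallest values to those slots.
--     slots = []
--     c = columnn
--     for _ in range(3):
--         if c == 0:
--             slots.append(0)
--             c = 1
--         elif c < 5:
--             slots.append(c)
--             c += 2
--     vals = sorted(median_x)[:len(slots)]
--     for s, v in zip(slots, vals):
--         median_columns[s] = v
--         median_x.remove(v)
--     return median_columns
-- ===== Notes on version B (the rewrite author's own statement) =====
-- stated objective: alternative
-- what changed: B precomputes the target slot keys by simulating the columnn rule, sorts median_x once and assigns its k smallest values to those slots, instead of A's single loop that interleaves slot-stepping with repeated min()+remove().
import Mathlib
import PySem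

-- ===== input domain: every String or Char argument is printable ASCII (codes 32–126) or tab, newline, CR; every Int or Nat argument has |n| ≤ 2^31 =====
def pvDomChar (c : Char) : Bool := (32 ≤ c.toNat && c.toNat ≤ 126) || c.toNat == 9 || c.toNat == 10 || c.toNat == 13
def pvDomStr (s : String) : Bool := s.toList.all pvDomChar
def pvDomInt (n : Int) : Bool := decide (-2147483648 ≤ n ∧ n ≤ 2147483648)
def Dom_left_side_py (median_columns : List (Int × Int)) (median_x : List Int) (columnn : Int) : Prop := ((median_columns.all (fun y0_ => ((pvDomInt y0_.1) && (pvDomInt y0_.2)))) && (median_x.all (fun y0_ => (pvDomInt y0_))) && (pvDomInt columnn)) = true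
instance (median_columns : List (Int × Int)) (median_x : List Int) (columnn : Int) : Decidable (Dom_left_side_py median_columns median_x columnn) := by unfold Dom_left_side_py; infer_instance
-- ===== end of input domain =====

-- B replaces A's loop interleaving min()/remove() with slot-stepping by: precompute
-- the slot keys, sort median_x once, assign its k smallest values (objective: alternative).
-- NOTE: both Pythons mutate the dict median_columns and the list median_x in place;
-- the equivalence proved here is about the RETURN value only (the mutations happen
-- to coincide on Pre_, but that is not part of the claim).

-- ===== PORT A =====
-- the for-i-in-range(3) loop of A; state = (median_columns, median_x, columnn)
def leftLoopA : Nat → PySem.Dict Int Int → List Int → Int → PySem.Dict Int Int × List Int × Int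
  | 0, d, xs, col => (d, xs, col)
  | n+1, d, xs, col =>
    if col = 0 then
      -- min(median_x) raises ValueError on empty median_x: excluded by Pre_; the .getD 0 fallback is unreachable there
      let m := (PySem.List.min? xs (fun y => y)).getD 0
      leftLoopA n (d.insert col m) ((PySem.List.remove? xs m).getD xs) 1
    else
      if col < 5 then
        let m := (PySem.List.min? xs (fun y => y)).getD 0
        leftLoopA n (d.insert col m) ((PySem.List.remove? xs m).getD xs) (col + 2)
      else
        leftLoopA n d xs col

def left_side_py (median_columns : List (Int × Int)) (median_x : List Int) (columnn : Int) : List (Int × Int) :=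
  ((leftLoopA 3 (PySem.Dict.mk median_columns) median_x columnn).1).items

-- ===== PORT B =====
-- slot list obtained by simulating the columnn rule for 3 steps (Source B's first loop)
def bSlots : Nat → Int → List Int
  | 0, _ => []
  | n+1, c =>
    if c = 0 then 0 :: bSlots n 1
    else if c < 5 then c :: bSlots n (c + 2)
    else bSlots n c

-- body of Source B's assignment loop: median_columns[s] = v; median_x.remove(v)
def bStep (st : PySem.Dict Int Int × List Int) (sv : Int × Int) : PySem.Dict Int Int × List Int :=
  (st.1.insert sv.1 sv.2, (PySem.List.remove? st.2 sv.2).getD st.2)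

def left_side_py_alt (median_columns : List (Int × Int)) (median_x : List Int) (columnn : Int) : List (Int × Int) :=
  let slots := bSlots 3 columnn
  let vals := (PySem.List.sorted median_x (fun y => y)).take slots.length
  (((slots.zip vals).foldl bStep (PySem.Dict.mk median_columns, median_x)).1).items

-- ===== PRECONDITION & SPEC =====
-- Pre_ is exactly where A returns: it excludes only the inputs on which A raises
-- ValueError (min() of median_x after it runs out of elements: fewer elements than
-- the number of slots the columnn rule fills — 3 for columnn ≤ 0, 2 for 1–2, 1 for 3–4, 0 for ≥ 5).
def Pre_left_side_py (median_columns : List (Int × Int)) (median_x : List Int) (columnn : Int) : Prop :=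
  5 ≤ columnn ∨ (columnn ≤ 0 ∧ 3 ≤ median_x.length) ∨
  ((columnn = 1 ∨ columnn = 2) ∧ 2 ≤ median_x.length) ∨
  ((columnn = 3 ∨ columnn = 4) ∧ 1 ≤ median_x.length)
instance (median_columns : List (Int × Int)) (median_x : List Int) (columnn : Int) : Decidable (Pre_left_side_py median_columns median_x columnn) := by unfold Pre_left_side_py; infer_instance

def pvWitness_left_side_py : (List (Int × Int)) × List Int × Int := ([(1, 2)], [7, 8, 9], 0)

def Spec_left_side_py (median_columns : List (Int × Int)) (median_x : List Int) (columnn : Int) (out : List (Int × Int)) : Prop := out = left_side_py_alt median_columns median_x columnn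
instance (median_columns : List (Int × Int)) (median_x : List Int) (columnn : Int) (out : List (Int × Int)) : Decidable (Spec_left_side_py median_columns median_x columnn out) := by unfold Spec_left_side_py; infer_instance

-- ===== CLAIM (what is proved, stated in full; the proofs are below) =====
def Claim_equal_left_side_py : Prop := ∀ (median_columns : List (Int × Int)) (median_x : List Int) (columnn : Int), Dom_left_side_py median_columns median_x columnn → Pre_left_side_py median_columns median_x columnn → Spec_left_side_py median_columns median_x columnn (left_side_py median_columns median_x columnn)


-- ===== LEMMAS AND PROOFS =====

-- head of the stable sort is Python's min (first minimal element), tail sorts the rest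
theorem sorted_cons_min (xs : List Int) (m : Int)
    (h : PySem.List.min? xs (fun y => y) = some m) :
    PySem.List.sorted xs (fun y => y) = m :: PySem.List.sorted (xs.erase m) (fun y => y) := by
  have hmem : m ∈ xs := PySem.List.min?_mem h
  apply PySem.List.sorted_id_eq_of_perm_of_pairwise
  · exact ((PySem.List.sorted_perm (xs.erase m) (fun y => y) false).cons m).trans
      (List.perm_cons_erase hmem).symm
  · refine List.pairwise_cons.mpr ⟨?_, ?_⟩
    · intro y hy
      have : y ∈ xs.erase m := (PySem.List.mem_sorted _ _ _ _).mp hy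
      exact PySem.List.min?_isMin h y (List.mem_of_mem_erase this)
    · exact PySem.List.sorted_pairwise (xs.erase m) (fun y => y)

-- the generalized equivalence of the two loops
theorem loop_eq (fuel : Nat) : ∀ (d : PySem.Dict Int Int) (xs : List Int) (c : Int),
    (bSlots fuel c).length ≤ xs.length →
    (leftLoopA fuel d xs c).1 =
    (((bSlots fuel c).zip ((PySem.List.sorted xs (fun y => y)).take (bSlots fuel c).length)).foldl
      bStep (d, xs)).1 := by
  induction fuel with
  | zero => intro d xs c _; rfl
  | succ n ih =>
    intro d xs c h
    by_cases hc0 : c = 0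
    · subst hc0
      have hlist : bSlots (n+1) 0 = 0 :: bSlots n 1 := by simp [bSlots]
      rw [hlist] at h ⊢
      have hne : xs ≠ [] := by
        intro he; subst he; simp at h
      obtain ⟨m, hm⟩ : ∃ m, PySem.List.min? xs (fun y => y) = some m := by
        cases heq : PySem.List.min? xs (fun y => y) with
        | none => exact absurd (((PySem.List.min?_eq_none_iff _ _).mp heq)) hne
        | some m => exact ⟨m, rfl⟩
      have hmem : m ∈ xs := PySem.List.min?_mem hm
      have hrem : PySem.List.remove? xs m = some (xs.erase m) :=
        PySem.List.remove?_eq_some_erase xs m hmem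
      have hlen : (xs.erase m).length = xs.length - 1 := List.length_erase_of_mem hmem
      have hstep : leftLoopA (n+1) d xs 0 = leftLoopA n (d.insert 0 m) (xs.erase m) 1 := by
        simp [leftLoopA, hm, hrem]
      rw [hstep, sorted_cons_min xs m hm, List.length_cons, List.take_succ_cons,
        List.zip_cons_cons, List.foldl_cons]
      have hbs : bStep (d, xs) (0, m) = (d.insert 0 m, xs.erase m) := by
        simp [bStep, hrem]
      rw [hbs]
      exact ih (d.insert 0 m) (xs.erase m) 1 (by simp at h; omega)
    · by_cases hc5 : c < 5
      · have hlist : bSlots (n+1) c = c :: bSlots n (c + 2) := by simp [bSlots, hc0, hc5]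
        rw [hlist] at h ⊢
        have hne : xs ≠ [] := by
          intro he; subst he; simp at h
        obtain ⟨m, hm⟩ : ∃ m, PySem.List.min? xs (fun y => y) = some m := by
          cases heq : PySem.List.min? xs (fun y => y) with
          | none => exact absurd (((PySem.List.min?_eq_none_iff _ _).mp heq)) hne
          | some m => exact ⟨m, rfl⟩
        have hmem : m ∈ xs := PySem.List.min?_mem hm
        have hrem : PySem.List.remove? xs m = some (xs.erase m) :=
          PySem.List.remove?_eq_some_erase xs m hmem
        have hlen : (xs.erase m).length = xs.length - 1 := List.length_erase_of_mem hmem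
        have hstep : leftLoopA (n+1) d xs c = leftLoopA n (d.insert c m) (xs.erase m) (c + 2) := by
          simp [leftLoopA, hc0, hc5, hm, hrem]
        rw [hstep, sorted_cons_min xs m hm, List.length_cons, List.take_succ_cons,
          List.zip_cons_cons, List.foldl_cons]
        have hbs : bStep (d, xs) (c, m) = (d.insert c m, xs.erase m) := by
          simp [bStep, hrem]
        rw [hbs]
        exact ih (d.insert c m) (xs.erase m) (c + 2) (by simp at h; omega)
      · have hlist : bSlots (n+1) c = bSlots n c := by simp [bSlots, hc0, hc5]
        have hstep : leftLoopA (n+1) d xs c = leftLoopA n d xs c := by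
          simp [leftLoopA, hc0, hc5]
        rw [hlist] at h ⊢
        rw [hstep]
        exact ih d xs c h

-- Pre_ gives exactly enough elements for the selected slots
theorem pre_bound (median_columns : List (Int × Int)) (median_x : List Int) (columnn : Int)
    (h : Pre_left_side_py median_columns median_x columnn) :
    (bSlots 3 columnn).length ≤ median_x.length := by
  unfold Pre_left_side_py at h
  rcases h with h5 | ⟨hle, hlen⟩ | ⟨hc, hlen⟩ | ⟨hc, hlen⟩
  · have : bSlots 3 columnn = [] := by
      simp [bSlots, show ¬ columnn = 0 by omega, show ¬ columnn < 5 by omega]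
    simp [this]
  · have : (bSlots 3 columnn).length = 3 := by
      simp only [bSlots]
      split_ifs <;> simp_all <;> omega
    omega
  · rcases hc with h1 | h2
    · subst h1; simpa [bSlots] using hlen
    · subst h2; simpa [bSlots] using hlen
  · rcases hc with h3 | h4
    · subst h3; simpa [bSlots] using hlen
    · subst h4; simpa [bSlots] using hlen

-- ===== VERDICT (by name: the statement is the Claim_ definition above) =====
theorem left_side_py_spec : Claim_equal_left_side_py := by
  intro mc mx c _ hpre
  unfold Spec_left_side_py left_side_py left_side_py_alt
  rw [loop_eq 3 (PySem.Dict.mk mc) mx c (pre_bound mc mx c hpre)]
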